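-- pv_equiv track=rewrite | github.com/jainpranav1/Medication_Reader | Medication_Reader.py | special_super_sort
-- ===== SOURCE A (Python) =====
-- def special_super_sort(raw_text, cent_word, side_word, lead, follow, sides):
--     '''
--     :param raw_text: Enter an array which contains all the raw text
--     :param cent_word: Enter an array which contains all the words found within the centers
--     :param side_word: Enter an array which contains all the words found within the sides
--     :param side_word: Enter an array which contains all the words to be removed from sides
--     :param lead: Enter text you do not want leading side words
--     :param follow: Enter text you do not want following side words
--     :param sides: Enter true or false [T/F] based on how you want sides to be displayed
--     :return: Returns an array of the centers (not center words) and sides/side words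
--     '''
--     raw_side_ind = []
--     raw_side_word = []
--     for a in range(len(raw_text)):
--         for b in side_word:
--             if (b in raw_text[a]) and ((lead+b+follow) not in raw_text[a]):
--                 raw_side_ind.append(a)
--                 raw_side_word.append(b)
--                 break
--     cent = []
--     side = []
--     for c in range(len(raw_text)):
--         for d in cent_word:
--             if (d in raw_text[c]) and (len(raw_text[c]) < 50):
--                 cent.append(raw_text[c].strip())
--                 f = [abs(c - e) for e in raw_side_ind]
--                 g = f.index(min((g for g in f if g > 0)))
--                 if sides == 'F':
--                     side.append(raw_side_word[g])
--                 else: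
--                     sep = raw_side_word[g]
--                     side.append(raw_text[raw_side_ind[g]].split(sep, 1)[0] + sep)
--                 break
--     return cent, side
-- ===== SOURCE B (Python) =====
-- def special_super_sort(raw_text, cent_word, side_word, lead, follow, sides):
--     # One pass records side lines; nearest side line per center is found by
--     # binary search over the (by construction sorted) index list instead of
--     # building a distance list and scanning it twice per center.
--     inds = []
--     words = []
--     for a, line in enumerate(raw_text):
--         w = next((b for b in side_word if b in line and lead + b + follow not in line), None)
--         if w is not None:
--             inds.append(a)
--             words.append(w)
--     cent = []
--     side = []
--     for c, line in enumerate(raw_text):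
--         if len(line) < 50 and any(d in line for d in cent_word):
--             cent.append(line.strip())
--             g = _nearest(inds, c)
--             if sides == 'F':
--                 side.append(words[g])
--             else:
--                 sep = words[g]
--                 side.append(raw_text[inds[g]].split(sep, 1)[0] + sep)
--     return cent, side
--
--
-- def _nearest(inds, c):
--     # first index with inds[i] >= c (inds is strictly increasing)
--     lo, hi = 0, len(inds)
--     while lo < hi:
--         mid = (lo + hi) // 2
--         if inds[mid] < c:
--             lo = mid + 1
--         else:
--             hi = mid
--     right = lo
--     if right < len(inds) and inds[right] == c:
--         right += 1          # skip the zero-distance entry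
--     if lo == 0:
--         return right
--     if right >= len(inds):
--         return lo - 1
--     return lo - 1 if c - inds[lo - 1] <= inds[right] - c else right
-- ===== Notes on version B (the rewrite author's own statement) =====
-- stated objective: faster
-- what changed: Per center, A builds the full list of |c-e| distances and scans it twice (min over the positive ones, then list.index); B records each line's first matching side word with next(), then binary-searches the already-sorted side-index list for the nearest positive-distance neighbour (lower index on ties), so each center costs O(log m) instead of O(m).
import Mathlib
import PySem

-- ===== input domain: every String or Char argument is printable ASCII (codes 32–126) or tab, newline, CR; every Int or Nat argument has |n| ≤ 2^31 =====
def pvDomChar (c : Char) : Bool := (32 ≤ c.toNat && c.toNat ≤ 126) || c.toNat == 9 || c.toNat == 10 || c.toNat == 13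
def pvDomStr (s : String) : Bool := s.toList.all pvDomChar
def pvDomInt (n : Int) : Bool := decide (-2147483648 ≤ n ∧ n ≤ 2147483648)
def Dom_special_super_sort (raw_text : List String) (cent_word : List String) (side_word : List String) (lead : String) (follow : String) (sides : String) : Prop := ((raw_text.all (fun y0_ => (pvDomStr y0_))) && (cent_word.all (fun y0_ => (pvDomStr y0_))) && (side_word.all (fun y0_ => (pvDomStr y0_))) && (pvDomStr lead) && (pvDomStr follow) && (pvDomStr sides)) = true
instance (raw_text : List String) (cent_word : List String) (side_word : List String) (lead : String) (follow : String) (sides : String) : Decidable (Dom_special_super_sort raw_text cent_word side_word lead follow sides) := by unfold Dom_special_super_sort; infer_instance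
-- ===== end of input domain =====

-- B replaces A's per-center distance list with its double scan (min over the positive distances,
-- then list.index) by a binary search over the already-sorted recorded side-line index list.

-- ===== PORT A =====
-- A's inner 'for b in side_word: … break' loop (first recorded side word of a line)
def pvA_findSide (side_word : List String) (line lead follow : String) : Option String :=
  match side_word with
  | [] => none
  | b :: rest =>
    if PySem.Str.isIn b line && !(PySem.Str.isIn (lead ++ b ++ follow) line) then some b
    else pvA_findSide rest line lead follow

-- A's inner 'for d in cent_word: … break' loop
def pvA_findCent (cent_word : List String) (line : String) : Option String :=
  match cent_word with
  | [] => none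
  | d :: rest =>
    if PySem.Str.isIn d line && decide (PySem.Str.len line < 50) then some d
    else pvA_findCent rest line

def special_super_sort (raw_text : List String) (cent_word : List String) (side_word : List String) (lead : String) (follow : String) (sides : String) : List String × List String :=
  let n : Int := (raw_text.length : Int)
  let phase1 := (PySem.List.pyRange 0 n).foldl
    (fun st a =>
      match pvA_findSide side_word (PySem.List.pyGetD raw_text a "") lead follow with
      | some b => (st.1 ++ [a], st.2 ++ [b])
      | none => st)
    (([] : List Int), ([] : List String))
  let raw_side_ind := phase1.1
  let raw_side_word := phase1.2
  (PySem.List.pyRange 0 n).foldl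
    (fun st c =>
      match pvA_findCent cent_word (PySem.List.pyGetD raw_text c "") with
      | none => st
      | some _ =>
        let cent' := st.1 ++ [PySem.Str.strip (PySem.List.pyGetD raw_text c "")]
        let f := raw_side_ind.map (fun e => |c - e|)
        match PySem.List.min? (f.filter (fun x => decide (0 < x))) (fun x => x) with
        | none => (cent', st.2)   -- Python raises ValueError (min of empty) here; excluded by Pre_
        | some m =>
          let g : Nat := (PySem.List.index? f m).getD 0
          if sides == "F" then (cent', st.2 ++ [PySem.List.pyGetD raw_side_word (g : Int) ""])
          else
            let sep := PySem.List.pyGetD raw_side_word (g : Int) ""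
            let srcline := PySem.List.pyGetD raw_text (PySem.List.pyGetD raw_side_ind (g : Int) 0) ""
            -- sep = "" raises ValueError in Python (excluded by Pre_); the .getD [] is never read there
            (cent', st.2 ++ [(((PySem.Str.splitMax? srcline sep 1).getD []).getD 0 "") ++ sep]))
    (([] : List String), ([] : List String))

-- ===== PORT B =====
-- B's hand-written bisect-left loop ('while lo < hi: …'), made structural with the fuel hi - lo
-- (an upper bound on the iteration count); (lo+hi)//2 on Nat is exact here (both operands ≥ 0)
def pvB_bsearchGo (inds : List Int) (c : Int) : Nat → Nat → Nat → Nat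
  | 0, lo, _hi => lo
  | fuel + 1, lo, hi =>
    if lo < hi then
      let mid := (lo + hi) / 2
      if PySem.List.pyGetD inds (mid : Int) 0 < c then pvB_bsearchGo inds c fuel (mid + 1) hi
      else pvB_bsearchGo inds c fuel lo mid
    else lo

def pvB_bsearch (inds : List Int) (c : Int) (lo hi : Nat) : Nat :=
  pvB_bsearchGo inds c (hi - lo) lo hi

-- B's _nearest: nearest positive-distance index in the sorted list, lower index on ties
def pvB_nearest (inds : List Int) (c : Int) : Nat :=
  let lo := pvB_bsearch inds c 0 inds.length
  let right := if lo < inds.length && (PySem.List.pyGetD inds (lo : Int) 0 == c) then lo + 1 else lo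
  if lo == 0 then right
  else if inds.length ≤ right then lo - 1
  else if c - PySem.List.pyGetD inds ((lo : Int) - 1) 0 ≤ PySem.List.pyGetD inds (right : Int) 0 - c then lo - 1
  else right

def special_super_sort_alt (raw_text : List String) (cent_word : List String) (side_word : List String) (lead : String) (follow : String) (sides : String) : List String × List String :=
  let phase1 := (PySem.List.enumerate raw_text).foldl
    (fun st p =>
      match side_word.find? (fun b => PySem.Str.isIn b p.2 && !(PySem.Str.isIn (lead ++ b ++ follow) p.2)) with
      | some b => (st.1 ++ [p.1], st.2 ++ [b])
      | none => st)
    (([] : List Int), ([] : List String))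
  let inds := phase1.1
  let words := phase1.2
  (PySem.List.enumerate raw_text).foldl
    (fun st p =>
      if decide (PySem.Str.len p.2 < 50) && cent_word.any (fun d => PySem.Str.isIn d p.2) then
        let cent' := st.1 ++ [PySem.Str.strip p.2]
        let g : Nat := pvB_nearest inds p.1
        if sides == "F" then (cent', st.2 ++ [PySem.List.pyGetD words (g : Int) ""])
        else
          let sep := PySem.List.pyGetD words (g : Int) ""
          let srcline := PySem.List.pyGetD raw_text (PySem.List.pyGetD inds (g : Int) 0) ""
          (cent', st.2 ++ [(((PySem.Str.splitMax? srcline sep 1).getD []).getD 0 "") ++ sep])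
      else st)
    (([] : List String), ([] : List String))

-- ===== PRECONDITION & SPEC =====
-- 'b in line and lead+b+follow not in line' (the condition that records a side line)
def pvSideCond (lead follow line b : String) : Bool :=
  PySem.Str.isIn b line && !(PySem.Str.isIn (lead ++ b ++ follow) line)

-- 'some d in line, and len(line) < 50' (the condition that makes a line a center)
def pvIsCent (cent_word : List String) (line : String) : Bool :=
  decide (PySem.Str.len line < 50) && cent_word.any (fun d => PySem.Str.isIn d line)

-- 'a is the recorded index A selects for center c': recorded, positive distance, and of minimal
-- |c-a| among such (ties to the lower index — A's f.index(min(...)) rule)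
def pvChosen (raw_text side_word : List String) (lead follow : String) (c a : Nat) : Bool :=
  side_word.any (pvSideCond lead follow (raw_text.getD a "")) && a != c &&
  (List.range raw_text.length).all (fun a' =>
    !(side_word.any (pvSideCond lead follow (raw_text.getD a' "")) && a' != c) ||
    decide (|(c : Int) - a| < |(c : Int) - a'| ∨ (|(c : Int) - a| = |(c : Int) - a'| ∧ a ≤ a')))

-- Pre_ excludes exactly the inputs on which Python A raises: a ValueError from min() of an empty
-- sequence when some center line has no other recorded side line, and a ValueError from
-- str.split('') when sides ≠ 'F' and the side word A selects for some center (pvChosen) is "".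
def Pre_special_super_sort (raw_text : List String) (cent_word : List String) (side_word : List String) (lead : String) (follow : String) (sides : String) : Prop :=
  (∀ c ∈ List.range raw_text.length, pvIsCent cent_word (raw_text.getD c "") = true →
      ∃ a ∈ List.range raw_text.length, a ≠ c ∧
        side_word.any (pvSideCond lead follow (raw_text.getD a "")) = true)
  ∧ (sides = "F"
      ∨ ∀ c ∈ List.range raw_text.length, pvIsCent cent_word (raw_text.getD c "") = true →
          ∀ a ∈ List.range raw_text.length, pvChosen raw_text side_word lead follow c a = true →
            side_word.find? (pvSideCond lead follow (raw_text.getD a "")) ≠ some "")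

instance (raw_text : List String) (cent_word : List String) (side_word : List String) (lead : String) (follow : String) (sides : String) : Decidable (Pre_special_super_sort raw_text cent_word side_word lead follow sides) := by
  unfold Pre_special_super_sort; infer_instance

def pvWitness_special_super_sort : List String × List String × List String × String × String × String :=
  (["ab", "cd"], ["ab"], ["cd"], "x", "y", "F")

def Spec_special_super_sort (raw_text : List String) (cent_word : List String) (side_word : List String) (lead : String) (follow : String) (sides : String) (out : List String × List String) : Prop := out = special_super_sort_alt raw_text cent_word side_word lead follow sides
instance (raw_text : List String) (cent_word : List String) (side_word : List String) (lead : String) (follow : String) (sides : String) (out : List String × List String) : Decidable (Spec_special_super_sort raw_text cent_word side_word lead follow sides out) := by unfold Spec_special_super_sort; infer_instance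

-- ===== CLAIM (what is proved, stated in full; the proofs are below) =====
def Claim_equal_special_super_sort : Prop := ∀ (raw_text : List String) (cent_word : List String) (side_word : List String) (lead : String) (follow : String) (sides : String), Dom_special_super_sort raw_text cent_word side_word lead follow sides → Pre_special_super_sort raw_text cent_word side_word lead follow sides → Spec_special_super_sort raw_text cent_word side_word lead follow sides (special_super_sort raw_text cent_word side_word lead follow sides)

-- ===== LEMMAS AND PROOFS =====

theorem pv_findSide_eq (sw : List String) (line lead follow : String) :
    pvA_findSide sw line lead follow = sw.find? (pvSideCond lead follow line) := by
  induction sw with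
  | nil => rfl
  | cons b rest ih =>
    have hb : (PySem.Str.isIn b line && !(PySem.Str.isIn (lead ++ b ++ follow) line)) = pvSideCond lead follow line b := rfl
    simp only [pvA_findSide, hb, List.find?_cons]
    cases h : pvSideCond lead follow line b <;> simp only [if_true, if_false, Bool.false_eq_true, ih]

theorem pvSideCond_eta (lead follow line : String) :
    (fun b => PySem.Str.isIn b line && !(PySem.Str.isIn (lead ++ b ++ follow) line)) = pvSideCond lead follow line := rfl

theorem pv_findCent_isSome (cw : List String) (line : String) :
    (pvA_findCent cw line).isSome = pvIsCent cw line := by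
  induction cw with
  | nil => simp [pvA_findCent, pvIsCent]
  | cons d rest ih =>
    simp only [pvA_findCent, pvIsCent, List.any_cons]
    cases hL : decide (PySem.Str.len line < 50) <;>
      cases hI : PySem.Str.isIn d line <;>
        simp_all [pvIsCent]

-- the recorded (index, word) pairs, in order
def pvPairs (raw_text side_word : List String) (lead follow : String) : List (Int × String) :=
  (PySem.List.pyRange 0 (raw_text.length : Int)).filterMap
    (fun a => (side_word.find? (pvSideCond lead follow (PySem.List.pyGetD raw_text a ""))).map (fun b => (a, b)))

theorem pv_foldl_pairs (L : List Int) (F : Int → Option String)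
    (step : List Int × List String → Int → List Int × List String)
    (hstep : ∀ st a, step st a = match F a with
      | some b => (st.1 ++ [a], st.2 ++ [b])
      | none => st) :
    ∀ st, L.foldl step st
      = (st.1 ++ (L.filterMap (fun a => (F a).map (fun b => (a, b)))).map Prod.fst,
         st.2 ++ (L.filterMap (fun a => (F a).map (fun b => (a, b)))).map Prod.snd) := by
  induction L with
  | nil => intro st; simp
  | cons a L ih =>
    intro st
    rw [List.foldl_cons, hstep]
    cases hF : F a <;> simp [hF, ih]

theorem pv_pairs_fst_pairwise (raw_text side_word : List String) (lead follow : String) :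
    ((pvPairs raw_text side_word lead follow).map Prod.fst).Pairwise (· < ·) := by
  have h1 : (PySem.List.pyRange 0 (raw_text.length : Int)).Pairwise (· < ·) := by
    rw [PySem.List.pyRange_zero_natCast]
    exact List.Pairwise.map _ (fun a b h => by exact_mod_cast h) (List.pairwise_lt_range)
  unfold pvPairs
  rw [List.pairwise_map, List.pairwise_filterMap]
  refine h1.imp ?_
  rintro a a' hab p hp q hq
  simp only [Option.map_eq_some_iff] at hp hq
  obtain ⟨b1, -, rfl⟩ := hp
  obtain ⟨b2, -, rfl⟩ := hq
  exact hab

theorem pv_mem_pairs_fst (raw_text side_word : List String) (lead follow : String) (a : Nat)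
    (ha : a < raw_text.length)
    (hany : side_word.any (pvSideCond lead follow (raw_text.getD a "")) = true) :
    ((a : Int)) ∈ (pvPairs raw_text side_word lead follow).map Prod.fst := by
  rw [List.mem_map]
  obtain ⟨w, hw⟩ := Option.isSome_iff_exists.mp (List.find?_isSome.mpr (List.any_eq_true.mp hany))
  refine ⟨((a : Int), w), ?_, rfl⟩
  rw [pvPairs, List.mem_filterMap]
  refine ⟨(a : Int), ?_, ?_⟩
  · rw [PySem.List.mem_pyRange_one]; omega
  · rw [PySem.List.pyGetD_natCast, hw]; rfl

theorem pv_getI (inds : List Int) (k : Nat) (hk : k < inds.length) :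
    PySem.List.pyGetD inds (k : Int) 0 = inds[k] := by
  rw [PySem.List.pyGetD_natCast]
  exact List.getD_eq_getElem _ _ hk

theorem pvB_bsearch_spec (inds : List Int) (c : Int)
    (hmono : ∀ j k (hj : j < inds.length) (hk : k < inds.length), j < k → inds[j] < inds[k]) :
    ∀ fuel lo hi, hi - lo ≤ fuel → lo ≤ hi → hi ≤ inds.length →
    (∀ j (hj : j < inds.length), j < lo → inds[j] < c) →
    (∀ j (hj : j < inds.length), hi ≤ j → c ≤ inds[j]) →
    lo ≤ pvB_bsearchGo inds c fuel lo hi ∧ pvB_bsearchGo inds c fuel lo hi ≤ hi ∧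
    (∀ j (hj : j < inds.length), j < pvB_bsearchGo inds c fuel lo hi → inds[j] < c) ∧
    (∀ j (hj : j < inds.length), pvB_bsearchGo inds c fuel lo hi ≤ j → c ≤ inds[j]) := by
  intro fuel
  induction fuel with
  | zero =>
    intro lo hi hf hlh hhl hlt hge
    simp only [pvB_bsearchGo]
    exact ⟨le_refl _, by omega, hlt, fun j hj h => hge j hj (by omega)⟩
  | succ fuel ih =>
    intro lo hi hf hlh hhl hlt hge
    simp only [pvB_bsearchGo]
    by_cases h : lo < hi
    · simp only [h, if_true]
      have hmlen : (lo + hi) / 2 < inds.length := by omega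
      rw [pv_getI inds _ hmlen]
      by_cases hc : inds[(lo + hi) / 2] < c
      · simp only [hc, if_true]
        obtain ⟨h1, h2, h3, h4⟩ := ih ((lo + hi) / 2 + 1) hi (by omega) (by omega) hhl
          (fun j hj hjlt => by
            rcases Nat.lt_succ_iff_lt_or_eq.mp hjlt with h' | h'
            · exact lt_trans (hmono j _ hj hmlen h') hc
            · subst h'; exact hc) hge
        exact ⟨by omega, h2, h3, h4⟩
      · simp only [hc, if_false]
        obtain ⟨h1, h2, h3, h4⟩ := ih lo ((lo + hi) / 2) (by omega) (by omega) (by omega) hlt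
          (fun j hj hjge => by
            rcases Nat.eq_or_lt_of_le hjge with h' | h'
            · subst h'; omega
            · have := hmono _ j hmlen hj h'; omega)
        exact ⟨h1, by omega, h3, h4⟩
    · simp only [h, if_false]
      exact ⟨le_refl _, by omega, hlt, fun j hj hge' => hge j hj (by omega)⟩

theorem pv_index?_of_first {xs : List Int} {v : Int} {k : Nat} (hk : k < xs.length)
    (hv : xs[k] = v) (hprev : ∀ j (hj : j < xs.length), j < k → xs[j] ≠ v) :
    PySem.List.index? xs v = some k := by
  rw [PySem.List.index?_eq_some_iff]
  refine ⟨xs.take k, xs.drop (k + 1), ?_, by simp [List.length_take]; omega, ?_⟩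
  · conv_lhs => rw [← List.take_append_drop k xs]
    rw [← hv, List.drop_eq_getElem_cons hk]
  · intro hmem
    obtain ⟨j, hj, hjv⟩ := List.getElem_of_mem hmem
    have hjk : j < k ∧ j < xs.length := by simpa [List.length_take] using hj
    rw [List.getElem_take] at hjv
    exact hprev j hjk.2 hjk.1 hjv

theorem pv_minidx (inds : List Int) (c : Int) (r : Nat) (hr : r < inds.length)
    (hne : inds[r] ≠ c)
    (hF2 : ∀ j (hj : j < inds.length), inds[j] ≠ c → |c - inds[r]| ≤ |c - inds[j]|)
    (hF3 : ∀ j (hj : j < inds.length), j < r → |c - inds[j]| ≠ |c - inds[r]|) :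
    ∃ m, PySem.List.min? ((inds.map (fun e => |c - e|)).filter (fun x => decide (0 < x))) (fun x => x) = some m ∧
      (PySem.List.index? (inds.map (fun e => |c - e|)) m).getD 0 = r := by
  set f := inds.map (fun e => |c - e|) with hf
  have hflen : f.length = inds.length := by simp [hf]
  have hfget : ∀ j (hj : j < inds.length), f[j]'(by omega) = |c - inds[j]| := by
    intro j hj; simp [hf]
  have hmpos : 0 < |c - inds[r]| := abs_pos.mpr (by omega)
  have hmemf : |c - inds[r]| ∈ f := by
    rw [← hfget r hr]; exact List.getElem_mem _
  have hmemfil : |c - inds[r]| ∈ f.filter (fun x => decide (0 < x)) :=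
    List.mem_filter.mpr ⟨hmemf, by simpa using hmpos⟩
  cases hmin : PySem.List.min? (f.filter (fun x => decide (0 < x))) (fun x => x) with
  | none =>
    rw [PySem.List.min?_eq_none_iff] at hmin
    rw [hmin] at hmemfil
    simp at hmemfil
  | some m' =>
    have hle1 : m' ≤ |c - inds[r]| := PySem.List.min?_isMin hmin _ hmemfil
    obtain ⟨hm'f, hm'pos⟩ := List.mem_filter.mp (PySem.List.min?_mem hmin)
    obtain ⟨j, hj, hjv⟩ := List.getElem_of_mem hm'f
    have hjlen : j < inds.length := by omega
    rw [hfget j hjlen] at hjv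
    have hm'pos' : 0 < m' := by simpa using hm'pos
    have hjne : inds[j] ≠ c := by
      intro hcc
      rw [hcc, sub_self, abs_zero] at hjv
      omega
    have hle2 : |c - inds[r]| ≤ m' := hjv ▸ hF2 j hjlen hjne
    have hmeq : m' = |c - inds[r]| := le_antisymm hle1 hle2
    refine ⟨m', rfl, ?_⟩
    subst hmeq
    rw [pv_index?_of_first (xs := f) (k := r) (by omega) (hfget r hr)
      (fun j hj hjr => by rw [hfget j (by omega)]; exact hF3 j (by omega) hjr)]
    rfl

theorem pv_nearest_eq (inds : List Int) (c : Int)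
    (hs : inds.Pairwise (· < ·))
    (hex : ∃ e ∈ inds, e ≠ c) :
    ∃ m, PySem.List.min? ((inds.map (fun e => |c - e|)).filter (fun x => decide (0 < x))) (fun x => x) = some m ∧
      (PySem.List.index? (inds.map (fun e => |c - e|)) m).getD 0 = pvB_nearest inds c := by
  have hmono : ∀ j k (hj : j < inds.length) (hk : k < inds.length), j < k → inds[j] < inds[k] :=
    fun j k hj hk hjk => List.pairwise_iff_getElem.mp hs j k hj hk hjk
  have hmle : ∀ j k (hj : j < inds.length) (hk : k < inds.length), j ≤ k → inds[j] ≤ inds[k] := by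
    intro j k hj hk hjk
    rcases Nat.eq_or_lt_of_le hjk with h | h
    · subst h; exact le_refl _
    · exact le_of_lt (hmono j k hj hk h)
  obtain ⟨-, hlo2, hlt, hge⟩ := pvB_bsearch_spec inds c hmono inds.length 0 inds.length
    (by omega) (by omega) (le_refl _)
    (fun j hj h => absurd h (by omega))
    (fun j hj h => absurd hj (by omega))
  rw [show pvB_bsearchGo inds c inds.length 0 inds.length = pvB_bsearch inds c 0 inds.length from rfl]
    at hlo2 hlt hge
  set lo := pvB_bsearch inds c 0 inds.length with hloDef
  have habs_lt : ∀ j (hj : j < inds.length), j < lo → |c - inds[j]| = c - inds[j] :=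
    fun j hj h => abs_of_pos (by have := hlt j hj h; omega)
  have habs_gt : ∀ j (hj : j < inds.length), c < inds[j] → |c - inds[j]| = inds[j] - c :=
    fun j hj h => by rw [abs_sub_comm]; exact abs_of_pos (by omega)
  by_cases hlon : lo < inds.length
  · have hpgl : PySem.List.pyGetD inds (lo : Int) 0 = inds[lo] := pv_getI inds lo hlon
    by_cases hRc : inds[lo] = c
    · -- inds[lo] = c : right = lo + 1
      have e1 : (decide (lo < inds.length) && (PySem.List.pyGetD inds (lo : Int) 0 == c)) = true := by
        rw [hpgl]; simp [hlon, hRc]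
      by_cases h0 : lo = 0
      · -- r = 1
        have hc0 : inds[0]'(by omega) = c := by
          have := hRc; simp only [h0] at this; exact this
        have h1n : 1 < inds.length := by
          by_contra hcon
          obtain ⟨e, he, hne⟩ := hex
          obtain ⟨j, hj, hjv⟩ := List.getElem_of_mem he
          have hj0 : j = 0 := by omega
          subst hj0
          exact hne (by rw [← hjv]; exact hc0)
        have hgt1 : c < inds[1] := by
          rw [← hc0]; exact hmono 0 1 (by omega) h1n (by omega)
        have hnear : pvB_nearest inds c = 1 := by
          simp only [pvB_nearest, ← hloDef, e1, if_true]
          rw [if_pos (by simpa using h0)]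
          omega
        obtain ⟨m, hm1, hm2⟩ := pv_minidx inds c 1 h1n (by omega)
          (by
            intro j hj hjne
            by_cases hj0 : j = 0
            · exfalso; subst hj0; exact hjne hc0
            · have hj1 : c < inds[j] := by
                have := hmle 1 j h1n hj (by omega); omega
              rw [habs_gt 1 h1n hgt1, habs_gt j hj hj1]
              have := hmle 1 j h1n hj (by omega); omega)
          (by
            intro j hj hjr
            have hj0 : j = 0 := by omega
            subst hj0
            rw [hc0, sub_self, abs_zero, habs_gt 1 h1n hgt1]
            omega)
        exact ⟨m, hm1, by rw [hm2, hnear]⟩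
      · -- lo ≥ 1, inds[lo] = c
        have hl1 : inds[lo - 1]'(by omega) < c := hlt (lo - 1) (by omega) (by omega)
        by_cases hRlen : inds.length ≤ lo + 1
        · -- r = lo - 1 (no element to the right)
          have hnear : pvB_nearest inds c = lo - 1 := by
            simp only [pvB_nearest, ← hloDef, e1, if_true]
            rw [if_neg (by simpa using h0), if_pos (by omega)]
          obtain ⟨m, hm1, hm2⟩ := pv_minidx inds c (lo - 1) (by omega) (by omega)
            (by
              intro j hj hjne
              rcases lt_trichotomy j lo with hjlo | hjlo | hjlo
              · rw [habs_lt j hj hjlo, habs_lt (lo - 1) (by omega) (by omega)]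
                have := hmle j (lo - 1) hj (by omega) (by omega)
                omega
              · exfalso; subst hjlo; exact hjne hRc
              · omega
            )
            (by
              intro j hj hjr
              rw [habs_lt j hj (by omega), habs_lt (lo - 1) (by omega) (by omega)]
              have := hmono j (lo - 1) hj (by omega) (by omega)
              omega)
          exact ⟨m, hm1, by rw [hm2, hnear]⟩
        · -- right = lo + 1 < length
          have hrn : lo + 1 < inds.length := by omega
          have hgtr : c < inds[lo + 1] := by
            rw [← hRc]; exact hmono lo (lo + 1) hlon hrn (by omega)
          have hcast : ((lo : Int) - 1) = (((lo - 1 : Nat) : Int)) := by omega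
          have hpg1 : PySem.List.pyGetD inds ((lo : Int) - 1) 0 = inds[lo - 1] := by
            rw [hcast, pv_getI inds (lo - 1) (by omega)]
          have hpg2 : PySem.List.pyGetD inds (((lo + 1 : Nat) : Int)) 0 = inds[lo + 1] :=
            pv_getI inds (lo + 1) hrn
          by_cases hcmp : c - inds[lo - 1]'(by omega) ≤ inds[lo + 1]'hrn - c
          · have hnear : pvB_nearest inds c = lo - 1 := by
              simp only [pvB_nearest, ← hloDef, e1, if_true]
              rw [if_neg (by simpa using h0), if_neg (by omega), hpg1, hpg2, if_pos hcmp]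
            obtain ⟨m, hm1, hm2⟩ := pv_minidx inds c (lo - 1) (by omega) (by omega)
              (by
                intro j hj hjne
                rcases lt_trichotomy j lo with hjlo | hjlo | hjlo
                · rw [habs_lt j hj hjlo, habs_lt (lo - 1) (by omega) (by omega)]
                  have := hmle j (lo - 1) hj (by omega) (by omega)
                  omega
                · exfalso; subst hjlo; exact hjne hRc
                · have hcj : c < inds[j] := by
                    have := hmle (lo + 1) j hrn hj (by omega); omega
                  rw [habs_gt j hj hcj, habs_lt (lo - 1) (by omega) (by omega)]
                  have := hmle (lo + 1) j hrn hj (by omega)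
                  omega)
              (by
                intro j hj hjr
                rw [habs_lt j hj (by omega), habs_lt (lo - 1) (by omega) (by omega)]
                have := hmono j (lo - 1) hj (by omega) (by omega)
                omega)
            exact ⟨m, hm1, by rw [hm2, hnear]⟩
          · have hnear : pvB_nearest inds c = lo + 1 := by
              simp only [pvB_nearest, ← hloDef, e1, if_true]
              rw [if_neg (by simpa using h0), if_neg (by omega), hpg1, hpg2, if_neg hcmp]
            obtain ⟨m, hm1, hm2⟩ := pv_minidx inds c (lo + 1) hrn (by omega)
              (by
                intro j hj hjne
                rcases lt_trichotomy j lo with hjlo | hjlo | hjlo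
                · rw [habs_lt j hj hjlo, habs_gt (lo + 1) hrn hgtr]
                  have := hmle j (lo - 1) hj (by omega) (by omega)
                  omega
                · exfalso; subst hjlo; exact hjne hRc
                · have hcj : c < inds[j] := by
                    have := hmle (lo + 1) j hrn hj (by omega); omega
                  rw [habs_gt j hj hcj, habs_gt (lo + 1) hrn hgtr]
                  have := hmle (lo + 1) j hrn hj (by omega)
                  omega)
              (by
                intro j hj hjr
                rw [habs_gt (lo + 1) hrn hgtr]
                rcases lt_trichotomy j lo with hjlo | hjlo | hjlo
                · rw [habs_lt j hj hjlo]
                  have := hmle j (lo - 1) hj (by omega) (by omega)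
                  omega
                · subst hjlo
                  rw [hRc, sub_self, abs_zero]
                  omega
                · omega)
            exact ⟨m, hm1, by rw [hm2, hnear]⟩
    · -- inds[lo] ≠ c : right = lo
      have e1 : (decide (lo < inds.length) && (PySem.List.pyGetD inds (lo : Int) 0 == c)) = false := by
        rw [hpgl]; simp [hRc]
      have hgtlo : c < inds[lo] := by
        have := hge lo hlon (le_refl _); omega
      by_cases h0 : lo = 0
      · -- r = 0 = lo
        have hnear : pvB_nearest inds c = lo := by
          simp only [pvB_nearest, ← hloDef, e1, Bool.false_eq_true, if_false]
          rw [if_pos (by simpa using h0)]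
        obtain ⟨m, hm1, hm2⟩ := pv_minidx inds c lo hlon (by omega)
          (by
            intro j hj hjne
            have hcj : c < inds[j] := by
              have := hmle lo j hlon hj (by omega); omega
            rw [habs_gt lo hlon hgtlo, habs_gt j hj hcj]
            have := hmle lo j hlon hj (by omega)
            omega)
          (by intro j hj hjr; omega)
        exact ⟨m, hm1, by rw [hm2, hnear]⟩
      · -- lo ≥ 1, right = lo < length
        have hl1 : inds[lo - 1]'(by omega) < c := hlt (lo - 1) (by omega) (by omega)
        have hcast : ((lo : Int) - 1) = (((lo - 1 : Nat) : Int)) := by omega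
        have hpg1 : PySem.List.pyGetD inds ((lo : Int) - 1) 0 = inds[lo - 1] := by
          rw [hcast, pv_getI inds (lo - 1) (by omega)]
        by_cases hcmp : c - inds[lo - 1]'(by omega) ≤ inds[lo]'hlon - c
        · have hnear : pvB_nearest inds c = lo - 1 := by
            simp only [pvB_nearest, ← hloDef, e1, Bool.false_eq_true, if_false]
            rw [if_neg (by simpa using h0), if_neg (by omega), hpg1, hpgl, if_pos hcmp]
          obtain ⟨m, hm1, hm2⟩ := pv_minidx inds c (lo - 1) (by omega) (by omega)
            (by
              intro j hj hjne
              rcases Nat.lt_or_ge j lo with hjlo | hjlo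
              · rw [habs_lt j hj hjlo, habs_lt (lo - 1) (by omega) (by omega)]
                have := hmle j (lo - 1) hj (by omega) (by omega)
                omega
              · have hcj : c < inds[j] := by
                  have := hmle lo j hlon hj hjlo; omega
                rw [habs_gt j hj hcj, habs_lt (lo - 1) (by omega) (by omega)]
                have := hmle lo j hlon hj hjlo
                omega)
            (by
              intro j hj hjr
              rw [habs_lt j hj (by omega), habs_lt (lo - 1) (by omega) (by omega)]
              have := hmono j (lo - 1) hj (by omega) (by omega)
              omega)
          exact ⟨m, hm1, by rw [hm2, hnear]⟩
        · have hnear : pvB_nearest inds c = lo := by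
            simp only [pvB_nearest, ← hloDef, e1, Bool.false_eq_true, if_false]
            rw [if_neg (by simpa using h0), if_neg (by omega), hpg1, hpgl, if_neg hcmp]
          obtain ⟨m, hm1, hm2⟩ := pv_minidx inds c lo hlon (by omega)
            (by
              intro j hj hjne
              rcases Nat.lt_or_ge j lo with hjlo | hjlo
              · rw [habs_lt j hj hjlo, habs_gt lo hlon hgtlo]
                have := hmle j (lo - 1) hj (by omega) (by omega)
                omega
              · have hcj : c < inds[j] := by
                  have := hmle lo j hlon hj hjlo; omega
                rw [habs_gt j hj hcj, habs_gt lo hlon hgtlo]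
                have := hmle lo j hlon hj hjlo
                omega)
            (by
              intro j hj hjr
              rw [habs_lt j hj (by omega), habs_gt lo hlon hgtlo]
              have := hmle j (lo - 1) hj (by omega) (by omega)
              omega)
          exact ⟨m, hm1, by rw [hm2, hnear]⟩
  · -- lo = inds.length
    have hloE : lo = inds.length := by omega
    have e1 : (decide (lo < inds.length) && (PySem.List.pyGetD inds (lo : Int) 0 == c)) = false := by
      simp [hlon]
    by_cases h0 : lo = 0
    · exfalso
      obtain ⟨e, he, hne⟩ := hex
      have hnil : inds = [] := List.eq_nil_of_length_eq_zero (by omega)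
      rw [hnil] at he
      simp at he
    · have hnear : pvB_nearest inds c = lo - 1 := by
        simp only [pvB_nearest, ← hloDef, e1, Bool.false_eq_true, if_false]
        rw [if_neg (by simpa using h0), if_pos (by omega)]
      obtain ⟨m, hm1, hm2⟩ := pv_minidx inds c (lo - 1) (by omega)
        (by have := hlt (lo - 1) (by omega) (by omega); omega)
        (by
          intro j hj hjne
          rw [habs_lt j hj (by omega), habs_lt (lo - 1) (by omega) (by omega)]
          have := hmle j (lo - 1) hj (by omega) (by omega)
          omega)
        (by
          intro j hj hjr
          rw [habs_lt j hj (by omega), habs_lt (lo - 1) (by omega) (by omega)]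
          have := hmono j (lo - 1) hj (by omega) (by omega)
          omega)
      exact ⟨m, hm1, by rw [hm2, hnear]⟩

-- ===== VERDICT (by name: the statement is the Claim_ definition above) =====
theorem special_super_sort_spec : Claim_equal_special_super_sort := by
  intro rt cw sw lead follow sides hdom hpre
  unfold Spec_special_super_sort
  obtain ⟨hpre1, -⟩ := hpre
  simp only [special_super_sort, special_super_sort_alt]
  rw [PySem.List.enumerate_eq_map_pyRange rt ""]
  rw [show PySem.List.len rt = ((rt.length : Nat) : Int) from rfl]
  simp only [List.foldl_map]
  simp only [pv_findSide_eq, pvSideCond_eta]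
  have hP : (List.foldl (fun (st : List Int × List String) (a : Int) =>
      match List.find? (pvSideCond lead follow (PySem.List.pyGetD rt a "")) sw with
      | some b => (st.1 ++ [a], st.2 ++ [b])
      | none => st) (([] : List Int), ([] : List String)) (PySem.List.pyRange 0 ((rt.length : Nat) : Int)))
      = ((pvPairs rt sw lead follow).map Prod.fst, (pvPairs rt sw lead follow).map Prod.snd) := by
    rw [pv_foldl_pairs _ (fun a => List.find? (pvSideCond lead follow (PySem.List.pyGetD rt a "")) sw) _ (fun st a => rfl)]
    simp [pvPairs]
  rw [hP]
  refine PySem.List.foldl_congr_mem _ _ _ _ ?_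
  intro st x hx
  obtain ⟨hx0, hxn⟩ := PySem.List.mem_pyRange_one.mp hx
  have hk : x.toNat < rt.length := by omega
  have hxk : x = ((x.toNat : Nat) : Int) := (Int.toNat_of_nonneg hx0).symm
  have hline : PySem.List.pyGetD rt x "" = rt.getD x.toNat "" := by
    conv_lhs => rw [hxk, PySem.List.pyGetD_natCast]
  cases hfc : pvA_findCent cw (PySem.List.pyGetD rt x "") with
  | none =>
    have hcent : pvIsCent cw (PySem.List.pyGetD rt x "") = false := by
      rw [← pv_findCent_isSome, hfc]; rfl
    rw [show (decide (PySem.Str.len (PySem.List.pyGetD rt x "") < 50) &&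
        cw.any fun d => PySem.Str.isIn d (PySem.List.pyGetD rt x "")) = false from hcent]
    simp only [Bool.false_eq_true, if_false]
  | some d =>
    have hcent : pvIsCent cw (PySem.List.pyGetD rt x "") = true := by
      rw [← pv_findCent_isSome, hfc]; rfl
    rw [show (decide (PySem.Str.len (PySem.List.pyGetD rt x "") < 50) &&
        cw.any fun d => PySem.Str.isIn d (PySem.List.pyGetD rt x "")) = true from hcent]
    simp only [if_true]
    have hcent' : pvIsCent cw (rt.getD x.toNat "") = true := by rw [← hline]; exact hcent
    obtain ⟨a, hamem, hane, hany⟩ := hpre1 x.toNat (List.mem_range.mpr hk) hcent'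
    have haN : a < rt.length := List.mem_range.mp hamem
    have hexx : ∃ e ∈ (pvPairs rt sw lead follow).map Prod.fst, e ≠ x := by
      refine ⟨(a : Int), pv_mem_pairs_fst rt sw lead follow a haN hany, ?_⟩
      rw [hxk]
      exact_mod_cast hane
    obtain ⟨m, hmin, hidx⟩ := pv_nearest_eq ((pvPairs rt sw lead follow).map Prod.fst) x
      (pv_pairs_fst_pairwise rt sw lead follow) hexx
    simp only [hmin]
    rw [hidx]
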